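-- pv_equiv track=rewrite | github.com/pypi-data/pypi-mirror-399 | packages/pybaseutils/pybaseutils-2.4.7.tar.gz/pybaseutils-2.4.7/pybaseutils/data_utils.py | get_orderly_outliers
-- ===== SOURCE A (Python) =====
-- def is_increase(data):
--     """
--     判断data是否是递增数列: 每个元素是否大于或等于前一个元素
--     :param data:
--     :return:
--     """
--     if len(data) <= 1: return True
--     return all(data[i] >= data[i - 1] for i in range(1, len(data)))
--
-- def get_orderly_outliers(data: list):
--     """
--     递增有序序列，查找异常值
--     :param data:
--     :return:
--     """
--     nums = len(data)
--     r = 1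
--     indexes = []
--     for i in range(1, nums):
--         x1 = max(0, i - r)
--         x2 = min(nums, i + r + 1)
--         window = data[x1:x2]
--         if not is_increase(window):
--             indexes.append(i)
--     return indexes
-- ===== SOURCE B (Python) =====
-- def get_orderly_outliers(data: list):
--     bad = set()
--     for j in range(len(data) - 1):
--         if data[j + 1] < data[j]:
--             bad.add(j + 1)
--             if j >= 1:
--                 bad.add(j)
--     return sorted(bad)
-- ===== Notes on version B (the rewrite author's own statement) =====
-- stated objective: faster
-- what changed: Instead of slicing a 2-3 element window per index and testing it with is_increase (a generator-based all() per index), B makes one pass over adjacent pairs and propagates each descent data[j+1]<data[j] to the indices j+1 and (for j>=1) j in a set, returning the sorted set.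
import Mathlib
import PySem

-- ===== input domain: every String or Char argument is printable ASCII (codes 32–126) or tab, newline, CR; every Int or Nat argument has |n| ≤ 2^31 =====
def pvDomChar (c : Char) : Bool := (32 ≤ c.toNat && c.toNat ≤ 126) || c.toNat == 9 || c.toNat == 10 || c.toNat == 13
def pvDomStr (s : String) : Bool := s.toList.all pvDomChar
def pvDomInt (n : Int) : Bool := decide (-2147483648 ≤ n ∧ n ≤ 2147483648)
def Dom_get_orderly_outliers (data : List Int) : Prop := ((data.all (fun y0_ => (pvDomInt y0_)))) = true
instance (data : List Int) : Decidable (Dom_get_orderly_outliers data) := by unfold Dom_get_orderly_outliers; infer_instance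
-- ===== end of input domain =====

-- B replaces A's per-index window slicing + is_increase test by a single adjacent-pair scan
-- that propagates each descent to its two neighbouring indices via a set (alternative decomposition).

-- ===== PORT A =====
def is_increase (data : List Int) : Bool :=
  if data.length ≤ 1 then true
  else (PySem.List.pyRange 1 (data.length : Int) 1).all
    (fun i => PySem.List.pyGetD data (i - 1) 0 ≤ PySem.List.pyGetD data i 0)

def get_orderly_outliers (data : List Int) : List Int :=
  let nums : Int := (data.length : Int)
  let r : Int := 1
  (PySem.List.pyRange 1 nums 1).foldl
    (fun indexes i =>
      let x1 := max 0 (i - r)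
      let x2 := min nums (i + r + 1)
      let window := PySem.List.slice data (some x1) (some x2)
      if !is_increase window then indexes ++ [i] else indexes)
    []

-- ===== PORT B =====
def get_orderly_outliers_alt (data : List Int) : List Int :=
  let bad : PySem.Set Int :=
    (PySem.List.pyRange 0 ((data.length : Int) - 1) 1).foldl
      (fun bad j =>
        if PySem.List.pyGetD data (j + 1) 0 < PySem.List.pyGetD data j 0 then
          let bad1 := PySem.Set.add bad (j + 1)
          if 1 ≤ j then PySem.Set.add bad1 j else bad1
        else bad)
      PySem.Set.empty
  PySem.List.sorted bad (fun x => x) false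

-- ===== PRECONDITION & SPEC =====
def Spec_get_orderly_outliers (data : List Int) (out : List Int) : Prop := out = get_orderly_outliers_alt data
instance (data : List Int) (out : List Int) : Decidable (Spec_get_orderly_outliers data out) := by unfold Spec_get_orderly_outliers; infer_instance

-- ===== CLAIM (what is proved, stated in full; the proofs are below) =====
def Claim_equal_get_orderly_outliers : Prop := ∀ (data : List Int), Dom_get_orderly_outliers data → Spec_get_orderly_outliers data (get_orderly_outliers data)

-- ===== LEMMAS AND PROOFS =====

-- the condition under which A appends index i (for 1 ≤ i < len data)
def pvCond (data : List Int) (i : Int) : Bool :=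
  decide (PySem.List.pyGetD data i 0 < PySem.List.pyGetD data (i - 1) 0) ||
  (decide (i + 1 < (data.length : Int)) &&
   decide (PySem.List.pyGetD data (i + 1) 0 < PySem.List.pyGetD data i 0))

theorem pv_inc_two (a b : Int) : is_increase [a, b] = decide (a ≤ b) := by
  simp [is_increase, PySem.List.pyRange, PySem.List.pyGetD, List.range_succ]

theorem pv_inc_three (a b c : Int) :
    is_increase [a, b, c] = (decide (a ≤ b) && decide (b ≤ c)) := by
  simp [is_increase, PySem.List.pyRange, PySem.List.pyGetD, List.range_succ]

-- the window A builds at index i is the 2- or 3-element block around i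
theorem pv_window (data : List Int) (m : Nat) (hm : m + 1 < data.length) :
    PySem.List.slice data (some (max 0 ((m : Int) + 1 - 1)))
        (some (min (data.length : Int) ((m : Int) + 1 + 1 + 1))) =
      (data.drop m).take 3 := by
  have h0 : max 0 ((m : Int) + 1 - 1) = ((m : Nat) : Int) := by omega
  rw [h0]
  by_cases hc : m + 3 <= data.length
  · have h1 : min (data.length : Int) ((m : Int) + 1 + 1 + 1) = ((m + 3 : Nat) : Int) := by
      push_cast; omega
    rw [h1, PySem.List.slice_natCast]
    congr 1
    omega
  · have h1 : min (data.length : Int) ((m : Int) + 1 + 1 + 1) = ((data.length : Nat) : Int) := by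
      omega
    rw [h1, PySem.List.slice_natCast]
    have hl : (data.drop m).length <= data.length - m := by simp
    rw [List.take_of_length_le (by omega), List.take_of_length_le (by omega)]

theorem pv_pointwise (data : List Int) (i : Int) (h1 : 1 <= i) (h2 : i < (data.length : Int)) :
    (!is_increase (PySem.List.slice data (some (max 0 (i - 1)))
        (some (min (data.length : Int) (i + 1 + 1))))) = pvCond data i := by
  obtain ⟨m, rfl⟩ : ∃ m : Nat, i = (m : Int) + 1 := ⟨(i - 1).toNat, by omega⟩
  have hm : m + 1 < data.length := by omega
  rw [pv_window data m hm]
  unfold pvCond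
  rw [show ((m : Int) + 1 + 1) = ((m + 2 : Nat) : Int) from by push_cast; ring]
  rw [show ((m : Int) + 1 - 1) = ((m : Nat) : Int) from by omega]
  rw [show ((m : Int) + 1) = ((m + 1 : Nat) : Int) from by push_cast; ring]
  simp only [PySem.List.pyGetD_natCast]
  rw [List.getD_eq_getElem data 0 (show m < data.length by omega),
      List.getD_eq_getElem data 0 (show m + 1 < data.length by omega)]
  by_cases hc : m + 2 < data.length
  · have e1 : (data.drop m).take 3 = [data[m], data[m+1], data[m+2]] := by
      rw [List.drop_eq_getElem_cons (show m < data.length by omega),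
          List.drop_eq_getElem_cons (show m + 1 < data.length by omega),
          List.drop_eq_getElem_cons (show m + 2 < data.length by omega)]
      rfl
    rw [e1, pv_inc_three,
        List.getD_eq_getElem data 0 (show m + 2 < data.length by omega)]
    have hc2 : ((m + 2 : Nat) : Int) < (data.length : Int) := by omega
    by_cases hab : data[m] <= data[m+1] <;> by_cases hbc : data[m+1] <= data[m+2] <;>
      simp [hab, hbc] <;> omega
  · have hlen : data.length = m + 2 := by omega
    have e1 : (data.drop m).take 3 = [data[m], data[m+1]] := by
      rw [List.drop_eq_getElem_cons (show m < data.length by omega),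
          List.drop_eq_getElem_cons (show m + 1 < data.length by omega),
          List.drop_eq_nil_of_le (by omega)]
      simp
    rw [e1, pv_inc_two]
    have hc2 : ¬ (((m + 2 : Nat) : Int) < (data.length : Int)) := by omega
    by_cases hab : data[m] <= data[m+1] <;> simp [hab] <;> omega

theorem pv_A_eq_filter (data : List Int) :
    get_orderly_outliers data =
      (PySem.List.pyRange 1 (data.length : Int) 1).filter (fun i => pvCond data i) := by
  unfold get_orderly_outliers
  rw [PySem.List.foldl_append_if_eq_filter
        (fun i => !is_increase (PySem.List.slice data (some (max 0 (i - 1)))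
          (some (min (data.length : Int) (i + 1 + 1)))))]
  rw [List.nil_append]
  apply List.filter_congr
  intro i hi
  rw [PySem.List.mem_pyRange_one] at hi
  exact pv_pointwise data i hi.1 hi.2

theorem pv_mem_fold (data : List Int) (js : List Int) (s : PySem.Set Int) (x : Int) :
    x ∈ js.foldl
        (fun bad j =>
          if PySem.List.pyGetD data (j + 1) 0 < PySem.List.pyGetD data j 0 then
            let bad1 := PySem.Set.add bad (j + 1)
            if 1 <= j then PySem.Set.add bad1 j else bad1
          else bad) s ↔
      x ∈ s ∨ ∃ j ∈ js, PySem.List.pyGetD data (j + 1) 0 < PySem.List.pyGetD data j 0 ∧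
        (x = j + 1 ∨ (1 <= j ∧ x = j)) := by
  induction js generalizing s with
  | nil => simp
  | cons j js ih =>
    rw [List.foldl_cons, ih]
    simp only [List.exists_mem_cons_iff]
    split_ifs with hdes hj
    · simp only [PySem.Set.mem_add]
      constructor
      · rintro (((h | h) | h) | h)
        · exact Or.inl h
        · exact Or.inr (Or.inl ⟨hdes, Or.inl h⟩)
        · exact Or.inr (Or.inl ⟨hdes, Or.inr ⟨hj, h⟩⟩)
        · exact Or.inr (Or.inr h)
      · rintro (h | (⟨-, (h | ⟨-, h⟩)⟩ | h))
        · exact Or.inl (Or.inl (Or.inl h))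
        · exact Or.inl (Or.inl (Or.inr h))
        · exact Or.inl (Or.inr h)
        · exact Or.inr h
    · simp only [PySem.Set.mem_add]
      constructor
      · rintro ((h | h) | h)
        · exact Or.inl h
        · exact Or.inr (Or.inl ⟨hdes, Or.inl h⟩)
        · exact Or.inr (Or.inr h)
      · rintro (h | (⟨-, (h | ⟨h1, -⟩)⟩ | h))
        · exact Or.inl (Or.inl h)
        · exact Or.inl (Or.inr h)
        · exact absurd h1 hj
        · exact Or.inr h
    · constructor
      · rintro (h | h)
        · exact Or.inl h
        · exact Or.inr (Or.inr h)
      · rintro (h | (⟨h1, -⟩ | h))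
        · exact Or.inl h
        · exact absurd h1 hdes
        · exact Or.inr h

theorem pv_nodup_fold (data : List Int) (js : List Int) (s : PySem.Set Int) (hs : s.Nodup) :
    (js.foldl
        (fun bad j =>
          if PySem.List.pyGetD data (j + 1) 0 < PySem.List.pyGetD data j 0 then
            let bad1 := PySem.Set.add bad (j + 1)
            if 1 <= j then PySem.Set.add bad1 j else bad1
          else bad) s).Nodup := by
  induction js generalizing s with
  | nil => exact hs
  | cons j js ih =>
    rw [List.foldl_cons]
    apply ih
    split_ifs <;>
      first
        | exact PySem.Set.nodup_add _ _ (PySem.Set.nodup_add _ _ hs)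
        | exact PySem.Set.nodup_add _ _ hs
        | exact hs

theorem pv_B_eq_filter (data : List Int) :
    get_orderly_outliers_alt data =
      (PySem.List.pyRange 1 (data.length : Int) 1).filter (fun i => pvCond data i) := by
  unfold get_orderly_outliers_alt
  apply PySem.List.sorted_eq_of_perm_of_pairwise_lt
  · rw [List.perm_ext_iff_of_nodup
      (List.Pairwise.nodup ((PySem.List.pairwise_lt_pyRange_one 1 (data.length : Int)).filter _))
      (pv_nodup_fold data _ PySem.Set.empty (show (PySem.Set.empty : PySem.Set Int).Nodup from List.nodup_nil))]
    intro x
    rw [pv_mem_fold, List.mem_filter, PySem.List.mem_pyRange_one]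
    unfold pvCond
    simp only [PySem.Set.empty, List.not_mem_nil, false_or, Bool.or_eq_true, Bool.and_eq_true,
      decide_eq_true_eq]
    constructor
    · rintro ⟨⟨hx1, hx2⟩, hcond⟩
      rcases hcond with h | ⟨hlt, h⟩
      · refine ⟨x - 1, ?_, ?_, Or.inl (by ring)⟩
        · rw [PySem.List.mem_pyRange_one]; omega
        · rwa [show x - 1 + 1 = x by ring]
      · exact ⟨x, by rw [PySem.List.mem_pyRange_one]; omega, h, Or.inr ⟨hx1, rfl⟩⟩
    · rintro ⟨j, hj, hdes, hx⟩
      rw [PySem.List.mem_pyRange_one] at hj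
      rcases hx with rfl | ⟨hj1, rfl⟩
      · refine ⟨⟨by omega, by omega⟩, Or.inl ?_⟩
        rwa [show j + 1 - 1 = j by ring]
      · exact ⟨⟨by omega, by omega⟩, Or.inr ⟨by omega, hdes⟩⟩
  · exact (PySem.List.pairwise_lt_pyRange_one 1 (data.length : Int)).filter _

-- ===== VERDICT (by name: the statement is the Claim_ definition above) =====
theorem get_orderly_outliers_spec : Claim_equal_get_orderly_outliers := by
  intro data _
  unfold Spec_get_orderly_outliers
  rw [pv_A_eq_filter, pv_B_eq_filter]
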